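-- pv_equiv track=rewrite | github.com/nyaarium/blender-nyaatools | NyaaTools/atlas/capture_bake.py | get_consolidated_bake_formats
-- ===== SOURCE A (Python) =====
-- from typing import Dict, List, Optional, Callable, Tuple, Any
--
-- def get_consolidated_bake_formats(requested_formats: List[str]) -> List[str]:
--     """
--     Consolidate requested DTP formats into intermediate bake formats.
--
--     Maps complex formats to standard intermediate formats:
--     - Color formats (rgba, rgb, cr, cg, cb, etc.) -> "rgba"
--     - Normal formats (normalgl, normaldx, nx, ng, nd) -> "normalgl"
--     - PBR formats (me, ro, sp, ao) -> "me-ro-sp"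
--     - Emission formats -> "emission"
--
--     Args:
--         requested_formats: List of requested DTP format strings
--
--     Returns:
--         List of consolidated intermediate format strings
--     """
--     targets = set()
--
--     dtp_category_map = {
--         "rgba": ["cr", "cg", "cb", "al", "lr", "lg", "lb", "rgba", "rgb"],
--         "normalgl": ["nx", "nd", "ng", "normaldx", "normalgl"],
--         "me-ro-sp": ["me", "ro", "sp", "ao", "sm"],
--         "emission": ["er", "eg", "eb", "es", "emission"],
--     }
--
--     for fmt in requested_formats:
--         fmt_lower = fmt.lower()
--
--         for target, keywords in dtp_category_map.items():
--             if target in targets: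
--                 continue
--
--             # Check direct match
--             if fmt_lower == target:
--                 targets.add(target)
--                 continue
--
--             # Check channel keywords
--             channels = fmt_lower.split("-")
--             for kw in keywords:
--                 if kw in channels or fmt_lower == kw:
--                     targets.add(target)
--                     break
--
--     return list(targets)
-- ===== SOURCE B (Python) =====
-- from typing import List
--
--
-- _KEYWORD_TO_CATEGORY = {
--     "cr": "rgba", "cg": "rgba", "cb": "rgba", "al": "rgba",
--     "lr": "rgba", "lg": "rgba", "lb": "rgba", "rgba": "rgba", "rgb": "rgba",
--     "nx": "normalgl", "nd": "normalgl", "ng": "normalgl",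
--     "normaldx": "normalgl", "normalgl": "normalgl",
--     "me": "me-ro-sp", "ro": "me-ro-sp", "sp": "me-ro-sp",
--     "ao": "me-ro-sp", "sm": "me-ro-sp",
--     "er": "emission", "eg": "emission", "eb": "emission",
--     "es": "emission", "emission": "emission",
-- }
--
--
-- def get_consolidated_bake_formats(requested_formats: List[str]) -> List[str]:
--     # Flat reverse lookup: each channel keyword maps straight to its category.
--     # The result set is emitted in sorted (deterministic) order.
--     targets = set()
--     for fmt in requested_formats:
--         for channel in fmt.lower().split("-"):
--             category = _KEYWORD_TO_CATEGORY.get(channel)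
--             if category is not None:
--                 targets.add(category)
--     return sorted(targets)
-- ===== Notes on version B (the rewrite author's own statement) =====
-- stated objective: faster
-- what changed: Replaces the nested per-category/per-keyword scan (with direct-match and already-added checks) by one flat keyword-to-category dict consulted once per '-'-separated channel; the result set is returned in sorted order (A's list(set) order is hash-arbitrary, the value is the same set).
import Mathlib
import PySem

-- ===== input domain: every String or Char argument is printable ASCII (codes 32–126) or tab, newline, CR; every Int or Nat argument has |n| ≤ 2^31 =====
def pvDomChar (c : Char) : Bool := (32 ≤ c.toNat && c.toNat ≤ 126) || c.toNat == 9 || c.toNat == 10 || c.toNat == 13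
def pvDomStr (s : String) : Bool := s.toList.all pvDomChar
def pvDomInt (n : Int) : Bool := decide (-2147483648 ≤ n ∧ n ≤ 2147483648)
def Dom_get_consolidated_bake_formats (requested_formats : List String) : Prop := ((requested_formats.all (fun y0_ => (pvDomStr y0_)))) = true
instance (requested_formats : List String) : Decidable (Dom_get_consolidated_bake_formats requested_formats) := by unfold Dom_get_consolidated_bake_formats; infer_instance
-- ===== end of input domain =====

-- B replaces A's nested per-category/per-keyword scan with one flat keyword→category lookup table
-- applied per channel (objective: simpler). Python A returns list(targets) of a set, whose order is
-- the interpreter's hash order; B returns sorted(targets). Both ports therefore emit the set in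
-- sorted order (outputs are compared as sets).


set_option maxHeartbeats 1000000
set_option maxRecDepth 8000

-- ===== PORT A =====
-- A's dtp_category_map dict literal, in insertion order
def pvDtpCategoryMap : List (String × List String) :=
  [("rgba", ["cr", "cg", "cb", "al", "lr", "lg", "lb", "rgba", "rgb"]),
   ("normalgl", ["nx", "nd", "ng", "normaldx", "normalgl"]),
   ("me-ro-sp", ["me", "ro", "sp", "ao", "sm"]),
   ("emission", ["er", "eg", "eb", "es", "emission"])]

-- body of A's inner `for target, keywords in dtp_category_map.items()` loop
-- ('-' is a non-empty separator, so split? is `some`; the keyword loop breaks on its first hit = List.any)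
def pvStepACat (fmt_lower : String) (targets : PySem.Set String) (tk : String × List String) : PySem.Set String :=
  if PySem.Set.contains targets tk.1 then targets
  else if fmt_lower == tk.1 then PySem.Set.add targets tk.1
  else if tk.2.any (fun kw => ((PySem.Str.split? fmt_lower "-").getD []).contains kw || fmt_lower == kw)
    then PySem.Set.add targets tk.1 else targets

-- `list(targets)` iterates a Python set in hash order (arbitrary); both ports emit the set sorted
def get_consolidated_bake_formats (requested_formats : List String) : List String :=
  PySem.List.sorted
    (requested_formats.foldl
      (fun targets fmt => pvDtpCategoryMap.foldl (pvStepACat (PySem.Str.lower fmt)) targets)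
      PySem.Set.empty)
    (fun x => x)

-- ===== PORT B =====
-- B's flat keyword → category dict literal (all keys distinct)
def pvKeywordToCategory : PySem.Dict String String :=
  ⟨[("cr", "rgba"), ("cg", "rgba"), ("cb", "rgba"), ("al", "rgba"),
    ("lr", "rgba"), ("lg", "rgba"), ("lb", "rgba"), ("rgba", "rgba"), ("rgb", "rgba"),
    ("nx", "normalgl"), ("nd", "normalgl"), ("ng", "normalgl"),
    ("normaldx", "normalgl"), ("normalgl", "normalgl"),
    ("me", "me-ro-sp"), ("ro", "me-ro-sp"), ("sp", "me-ro-sp"),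
    ("ao", "me-ro-sp"), ("sm", "me-ro-sp"),
    ("er", "emission"), ("eg", "emission"), ("eb", "emission"),
    ("es", "emission"), ("emission", "emission")]⟩

-- body of B's inner `for channel in fmt.lower().split("-")` loop
def pvAddChannel (targets : PySem.Set String) (channel : String) : PySem.Set String :=
  match PySem.Dict.get? pvKeywordToCategory channel with
  | some category => PySem.Set.add targets category
  | none => targets

def get_consolidated_bake_formats_alt (requested_formats : List String) : List String :=
  PySem.List.sorted
    (requested_formats.foldl
      (fun targets fmt =>
        ((PySem.Str.split? (PySem.Str.lower fmt) "-").getD []).foldl pvAddChannel targets)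
      PySem.Set.empty)
    (fun x => x)

-- ===== PRECONDITION & SPEC =====
def Spec_get_consolidated_bake_formats (requested_formats : List String) (out : List String) : Prop := out = get_consolidated_bake_formats_alt requested_formats
instance (requested_formats : List String) (out : List String) : Decidable (Spec_get_consolidated_bake_formats requested_formats out) := by unfold Spec_get_consolidated_bake_formats; infer_instance

-- ===== CLAIM (what is proved, stated in full; the proofs are below) =====
def Claim_equal_get_consolidated_bake_formats : Prop := ∀ (requested_formats : List String), Dom_get_consolidated_bake_formats requested_formats → Spec_get_consolidated_bake_formats requested_formats (get_consolidated_bake_formats requested_formats)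

-- ===== LEMMAS AND PROOFS =====

-- A's per-format "hit" condition for one category row (target, keywords)
def pvHitA (fl : String) (tk : String × List String) : Bool :=
  fl == tk.1 || tk.2.any (fun kw => ((PySem.Str.split? fl "-").getD []).contains kw || fl == kw)

theorem pvKW2Cat_get_iff (ch c : String) : PySem.Dict.get? pvKeywordToCategory ch = some c ↔
    ((c = "rgba" ∧ ch ∈ ["cr", "cg", "cb", "al", "lr", "lg", "lb", "rgba", "rgb"]) ∨
     (c = "normalgl" ∧ ch ∈ ["nx", "nd", "ng", "normaldx", "normalgl"]) ∨
     (c = "me-ro-sp" ∧ ch ∈ ["me", "ro", "sp", "ao", "sm"]) ∨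
     (c = "emission" ∧ ch ∈ ["er", "eg", "eb", "es", "emission"])) := by
  by_cases h : ch ∈ pvKeywordToCategory.items.map Prod.fst
  · fin_cases h <;> simp [pvKeywordToCategory, PySem.Dict.get?] <;> exact eq_comm
  · rw [show PySem.Dict.get? pvKeywordToCategory ch = none from by
      simp [PySem.Dict.get?, List.find?_eq_none, pvKeywordToCategory]
      simp [pvKeywordToCategory] at h
      tauto]
    simp [pvKeywordToCategory] at h ⊢
    tauto

theorem pv_mem_foldB (cs : List String) (t : PySem.Set String) (c : String) :
    c ∈ cs.foldl pvAddChannel t ↔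
      c ∈ t ∨ ∃ ch ∈ cs, PySem.Dict.get? pvKeywordToCategory ch = some c := by
  induction cs generalizing t with
  | nil => simp
  | cons hd tl ih =>
    simp only [List.foldl_cons, ih, List.mem_cons]
    unfold pvAddChannel
    rcases hcase : PySem.Dict.get? pvKeywordToCategory hd with _ | v
    · constructor
      · rintro (h | ⟨ch, hch, hget⟩)
        · exact Or.inl h
        · exact Or.inr ⟨ch, Or.inr hch, hget⟩
      · rintro (h | ⟨ch, (rfl | hch), hget⟩)
        · exact Or.inl h
        · simp [hcase] at hget
        · exact Or.inr ⟨ch, hch, hget⟩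
    · rw [PySem.Set.mem_add]
      constructor
      · rintro ((h | rfl) | ⟨ch, hch, hget⟩)
        · exact Or.inl h
        · exact Or.inr ⟨hd, Or.inl rfl, hcase⟩
        · exact Or.inr ⟨ch, Or.inr hch, hget⟩
      · rintro (h | ⟨ch, (rfl | hch), hget⟩)
        · exact Or.inl (Or.inl h)
        · rw [hcase] at hget
          exact Or.inl (Or.inr (Option.some_injective _ hget).symm)
        · exact Or.inr ⟨ch, hch, hget⟩

theorem pv_mem_stepACat (fl : String) (t : PySem.Set String) (tk : String × List String) (c : String) :
    c ∈ pvStepACat fl t tk ↔ c ∈ t ∨ (c = tk.1 ∧ pvHitA fl tk = true) := by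
  unfold pvStepACat
  split_ifs with h1 h2 h3
  · constructor
    · exact fun h => Or.inl h
    · rintro (h | ⟨rfl, -⟩)
      · exact h
      · exact (PySem.Set.contains_iff t tk.1).mp h1
  · have hhit : pvHitA fl tk = true := by
      unfold pvHitA; rw [h2]; rfl
    rw [PySem.Set.mem_add]
    constructor
    · rintro (h | rfl)
      exacts [Or.inl h, Or.inr ⟨rfl, hhit⟩]
    · rintro (h | ⟨rfl, -⟩)
      exacts [Or.inl h, Or.inr rfl]
  · have hhit : pvHitA fl tk = true := by
      unfold pvHitA; rw [h3, Bool.or_true]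
    rw [PySem.Set.mem_add]
    constructor
    · rintro (h | rfl)
      exacts [Or.inl h, Or.inr ⟨rfl, hhit⟩]
    · rintro (h | ⟨rfl, -⟩)
      exacts [Or.inl h, Or.inr rfl]
  · have hhit : pvHitA fl tk ≠ true := by
      unfold pvHitA
      intro hc
      rcases Bool.or_eq_true _ _ |>.mp hc with h | h
      · exact h2 h
      · exact h3 h
    constructor
    · exact fun h => Or.inl h
    · rintro (h | ⟨-, hh⟩)
      · exact h
      · exact absurd hh hhit

theorem pv_mem_foldACats (l : List (String × List String)) (fl : String) (t : PySem.Set String) (c : String) :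
    c ∈ l.foldl (pvStepACat fl) t ↔ c ∈ t ∨ ∃ tk ∈ l, c = tk.1 ∧ pvHitA fl tk = true := by
  induction l generalizing t with
  | nil => simp
  | cons hd tl ih =>
    simp only [List.foldl_cons, ih, pv_mem_stepACat, List.mem_cons]
    constructor
    · rintro ((h | h) | ⟨tk, htk, h⟩)
      · exact Or.inl h
      · exact Or.inr ⟨hd, Or.inl rfl, h⟩
      · exact Or.inr ⟨tk, Or.inr htk, h⟩
    · rintro (h | ⟨tk, (rfl | htk), h⟩)
      · exact Or.inl (Or.inl h)
      · exact Or.inl (Or.inr h)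
      · exact Or.inr ⟨tk, htk, h⟩

-- the heart of the equivalence: per format, A's category hits = B's channel lookups
theorem pv_hit_bridge (fl c : String) :
    (∃ tk ∈ pvDtpCategoryMap, c = tk.1 ∧ pvHitA fl tk = true) ↔
      ∃ ch ∈ (PySem.Str.split? fl "-").getD [], PySem.Dict.get? pvKeywordToCategory ch = some c := by
  constructor
  · rintro ⟨tk, htk, rfl, hhit⟩
    unfold pvHitA at hhit
    rcases Bool.or_eq_true _ _ |>.mp hhit with hdir | hany
    · -- direct match fmt_lower == target
      replace hdir : fl = tk.1 := by simpa using hdir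
      subst hdir
      simp only [pvDtpCategoryMap, List.mem_cons, List.not_mem_nil, or_false] at htk
      rcases htk with rfl | rfl | rfl | rfl <;> decide
    · rcases List.any_eq_true.mp hany with ⟨kw, hkwK, hkw⟩
      rcases Bool.or_eq_true _ _ |>.mp hkw with hin | heq
      · -- keyword kw occurs among the channels
        refine ⟨kw, by simpa using hin, ?_⟩
        simp only [pvDtpCategoryMap, List.mem_cons, List.not_mem_nil, or_false] at htk
        rcases htk with rfl | rfl | rfl | rfl <;> (fin_cases hkwK <;> decide)
      · -- fmt_lower == kw (kw has no '-', so it is its own single channel)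
        replace heq : fl = kw := by simpa using heq
        subst heq
        simp only [pvDtpCategoryMap, List.mem_cons, List.not_mem_nil, or_false] at htk
        rcases htk with rfl | rfl | rfl | rfl <;> (fin_cases hkwK <;> decide)
  · rintro ⟨ch, hch, hget⟩
    rw [pvKW2Cat_get_iff] at hget
    have hcont : ((PySem.Str.split? fl "-").getD []).contains ch = true := by
      simpa using hch
    have hstep : ∀ tk : String × List String, ch ∈ tk.2 → pvHitA fl tk = true := by
      intro tk hK
      unfold pvHitA
      refine Bool.or_eq_true _ _ |>.mpr (Or.inr (List.any_eq_true.mpr ⟨ch, hK, ?_⟩))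
      exact Bool.or_eq_true _ _ |>.mpr (Or.inl hcont)
    rcases hget with ⟨rfl, hK⟩ | ⟨rfl, hK⟩ | ⟨rfl, hK⟩ | ⟨rfl, hK⟩
    · exact ⟨("rgba", ["cr", "cg", "cb", "al", "lr", "lg", "lb", "rgba", "rgb"]),
        by simp [pvDtpCategoryMap], rfl, hstep _ hK⟩
    · exact ⟨("normalgl", ["nx", "nd", "ng", "normaldx", "normalgl"]),
        by simp [pvDtpCategoryMap], rfl, hstep _ hK⟩
    · exact ⟨("me-ro-sp", ["me", "ro", "sp", "ao", "sm"]),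
        by simp [pvDtpCategoryMap], rfl, hstep _ hK⟩
    · exact ⟨("emission", ["er", "eg", "eb", "es", "emission"]),
        by simp [pvDtpCategoryMap], rfl, hstep _ hK⟩

theorem pv_mem_final (rf : List String) (t t' : PySem.Set String)
    (hsame : ∀ c, c ∈ t ↔ c ∈ t') (c : String) :
    (c ∈ rf.foldl (fun targets fmt => pvDtpCategoryMap.foldl (pvStepACat (PySem.Str.lower fmt)) targets) t ↔
     c ∈ rf.foldl (fun targets fmt =>
        ((PySem.Str.split? (PySem.Str.lower fmt) "-").getD []).foldl pvAddChannel targets) t') := by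
  induction rf generalizing t t' with
  | nil => simpa using hsame c
  | cons hd tl ih =>
    simp only [List.foldl_cons]
    refine ih _ _ (fun d => ?_)
    rw [pv_mem_foldACats, pv_mem_foldB, hsame d, pv_hit_bridge]

theorem pv_nodup_stepACat (fl : String) (t : PySem.Set String) (tk : String × List String)
    (h : t.Nodup) : (pvStepACat fl t tk).Nodup := by
  unfold pvStepACat
  split_ifs <;> first | exact h | exact PySem.Set.nodup_add t tk.1 h

theorem pv_nodup_foldA (rf : List String) (t : PySem.Set String) (h : t.Nodup) :
    (rf.foldl (fun targets fmt => pvDtpCategoryMap.foldl (pvStepACat (PySem.Str.lower fmt)) targets) t).Nodup := by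
  induction rf generalizing t with
  | nil => exact h
  | cons hd tl ih =>
    refine ih _ ?_
    have : ∀ (l : List (String × List String)) (t : PySem.Set String), t.Nodup →
        (l.foldl (pvStepACat (PySem.Str.lower hd)) t).Nodup := by
      intro l
      induction l with
      | nil => exact fun t ht => ht
      | cons a as iha => exact fun t ht => iha _ (pv_nodup_stepACat _ t a ht)
    exact this _ _ h

theorem pv_nodup_foldB (rf : List String) (t : PySem.Set String) (h : t.Nodup) :
    (rf.foldl (fun targets fmt =>
      ((PySem.Str.split? (PySem.Str.lower fmt) "-").getD []).foldl pvAddChannel targets) t).Nodup := by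
  induction rf generalizing t with
  | nil => exact h
  | cons hd tl ih =>
    refine ih _ ?_
    have : ∀ (cs : List String) (t : PySem.Set String), t.Nodup →
        (cs.foldl pvAddChannel t).Nodup := by
      intro cs
      induction cs with
      | nil => exact fun t ht => ht
      | cons a as iha =>
        intro t ht
        refine iha _ ?_
        unfold pvAddChannel
        rcases PySem.Dict.get? pvKeywordToCategory a with _ | v
        · exact ht
        · exact PySem.Set.nodup_add t v ht
    exact this _ _ h

-- ===== VERDICT (by name: the statement is the Claim_ definition above) =====
theorem get_consolidated_bake_formats_spec : Claim_equal_get_consolidated_bake_formats := by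
  intro rf _
  unfold Spec_get_consolidated_bake_formats get_consolidated_bake_formats get_consolidated_bake_formats_alt
  refine PySem.List.sorted_eq_sorted_of_perm _ _ _ (fun a b h => h) ?_
  refine (List.perm_ext_iff_of_nodup ?_ ?_).mpr ?_
  · exact pv_nodup_foldA rf PySem.Set.empty List.nodup_nil
  · exact pv_nodup_foldB rf PySem.Set.empty List.nodup_nil
  · exact pv_mem_final rf PySem.Set.empty PySem.Set.empty (fun _ => Iff.rfl)
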